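-- pv_equiv track=rewrite | github.com/nonkronk/PCAP-netacad | PROJECT-DTS/p3.py | send_batch
-- ===== SOURCE A (Python) =====
-- def caesar_encript(txt, shift):
--     text_list = list(txt)
--     for i in range(len(txt)):
--         char = text_list[i]
--         if char.isalpha() == True:
--             asc = ord(char)
--             if char.islower() == True:
--                 text_list[i] = chr((asc - 97 + shift) % 26 + 97)
--             else:
--                 text_list[i] = chr((asc - 65 + shift) % 26 + 65)
--     return ''.join(text_list)
--
-- def shuffle_order(txt, order):
--     return ''.join([txt[i] for i in order])
--
-- def send_batch(txt, batch_order, shift=3):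
--     encrypted = caesar_encript(txt, shift)
--     n = len(batch_order)
--     remainder = len(encrypted) % n
--     if remainder != 0:
--         for i in range(n - remainder):
--             encrypted += "_"
--     batchs = [encrypted[i:i + n] for i in range(0, len(encrypted), n)]
--     shuffled = [shuffle_order(text, batch_order) for text in batchs]
--     return shuffled
-- ===== SOURCE B (Python) =====
-- def _shift_char(c, shift):
--     if 'a' <= c <= 'z':
--         return chr((ord(c) - 97 + shift) % 26 + 97)
--     if 'A' <= c <= 'Z':
--         return chr((ord(c) - 65 + shift) % 26 + 65)
--     return c
--
-- def send_batch(txt, batch_order, shift=3):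
--     # Column-major algorithm: scatter the encrypted characters into n columns
--     # (position p goes to column p % n), pad each column to the batch count with
--     # '_', then read the output rows straight across the columns picked by
--     # batch_order (Python's native list indexing handles negative entries and
--     # raises IndexError for out-of-range ones, as A does).
--     n = len(batch_order)
--     num = -(-len(txt) // n)  # ceil; ZeroDivisionError when batch_order is empty, as in A
--     cols = [[] for _ in range(n)]
--     for pos, c in enumerate(txt):
--         cols[pos % n].append(_shift_char(c, shift))
--     for col in cols:
--         col.extend('_' * (num - len(col)))
--     return [''.join(cols[j][b] for j in batch_order) for b in range(num)]
-- ===== Notes on version B (the rewrite author's own statement) =====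
-- stated objective: alternative
-- what changed: B replaces A's row-major pipeline (pad the whole ciphertext, slice it into n-length batches, permute each batch) by a column-major transpose: one scatter pass drops each encrypted character into column p%n, each column is padded to the batch count, and every output row is read straight across the columns selected by batch_order, so no padded string, batch list or per-batch slice ever exists.
import Mathlib
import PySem

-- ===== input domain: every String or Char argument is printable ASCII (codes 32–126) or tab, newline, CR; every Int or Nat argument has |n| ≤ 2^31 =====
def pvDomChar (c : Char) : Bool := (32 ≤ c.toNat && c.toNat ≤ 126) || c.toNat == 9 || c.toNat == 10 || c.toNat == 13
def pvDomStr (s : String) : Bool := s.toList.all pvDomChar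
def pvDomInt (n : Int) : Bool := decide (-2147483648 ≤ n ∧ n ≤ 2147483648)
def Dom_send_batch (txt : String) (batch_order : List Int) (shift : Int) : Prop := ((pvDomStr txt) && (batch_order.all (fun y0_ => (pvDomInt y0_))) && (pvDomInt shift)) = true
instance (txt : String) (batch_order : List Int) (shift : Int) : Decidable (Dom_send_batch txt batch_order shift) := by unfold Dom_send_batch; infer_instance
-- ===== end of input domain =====

-- B replaces A's row-major pipeline (pad the whole ciphertext, slice it into n-length
-- batches, permute each batch) by a column-major transpose: scatter each encrypted
-- character into column p % n, pad each column to the batch count, and read each output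
-- row straight across the columns picked by batch_order.

-- ===== PORT A =====
-- caesar_encript: loop over indices mutating the char list in place
def pvCaesarA (txt : List Char) (shift : Int) : List Char :=
  (PySem.List.pyRange 0 (txt.length : Int) 1).foldl (fun text_list i =>
    let char := PySem.List.pyGetD text_list i ' '
    if PySem.Chars.isalpha char then
      let asc : Int := char.toNat
      if PySem.Chars.islower char then
        PySem.List.pySetD text_list i (Char.ofNat ((PySem.Int.mod (asc - 97 + shift) 26 + 97).toNat))
      else
        PySem.List.pySetD text_list i (Char.ofNat ((PySem.Int.mod (asc - 65 + shift) 26 + 65).toNat))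
    else text_list) txt

-- shuffle_order: ''.join([txt[i] for i in order])
def pvShuffleA (txt : List Char) (order : List Int) : List Char :=
  order.map (fun i => PySem.List.pyGetD txt i ' ')

def send_batch (txt : String) (batch_order : List Int) (shift : Int) : List String :=
  let encrypted := pvCaesarA txt.toList shift
  let n := batch_order.length
  if n = 0 then []  -- totality guard: Python raises ZeroDivisionError here (outside Pre_)
  else
    let remainder := encrypted.length % n
    let encrypted :=
      if remainder ≠ 0 then
        (PySem.List.pyRange 0 ((n : Int) - (remainder : Int)) 1).foldl (fun e _ => e ++ ['_']) encrypted
      else encrypted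
    let batchs := (PySem.List.pyRange 0 (encrypted.length : Int) (n : Int)).map
      (fun i => PySem.List.slice encrypted (some i) (some (i + (n : Int))))
    batchs.map (fun text => String.ofList (pvShuffleA text batch_order))

-- ===== PORT B =====
def pvShiftCharB (c : Char) (shift : Int) : Char :=
  if 'a' ≤ c ∧ c ≤ 'z' then Char.ofNat ((PySem.Int.mod ((c.toNat : Int) - 97 + shift) 26 + 97).toNat)
  else if 'A' ≤ c ∧ c ≤ 'Z' then Char.ofNat ((PySem.Int.mod ((c.toNat : Int) - 65 + shift) 26 + 65).toNat)
  else c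

def send_batch_alt (txt : String) (batch_order : List Int) (shift : Int) : List String :=
  let n := batch_order.length
  if n = 0 then []  -- totality guard: Python raises ZeroDivisionError here (outside Pre_)
  else
    let num := -(PySem.Int.floordiv (-(txt.toList.length : Int)) (n : Int))
    -- scatter pass: cols[pos % n].append(shifted char)
    let cols := (PySem.List.enumerate txt.toList).foldl
      (fun cols pc =>
        let e := PySem.Int.mod pc.1 (n : Int)
        PySem.List.pySetD cols e (PySem.List.pyGetD cols e [] ++ [pvShiftCharB pc.2 shift]))
      ((PySem.List.pyRange 0 (n : Int) 1).map (fun _ => ([] : List Char)))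
    -- pad each column up to the batch count
    let cols := cols.map (fun col => col ++ List.replicate ((num - (col.length : Int)).toNat) '_')
    -- read the rows across the columns selected by batch_order
    (PySem.List.pyRange 0 num 1).map (fun b =>
      String.ofList (batch_order.map (fun j =>
        PySem.List.pyGetD (PySem.List.pyGetD cols j []) b ' ')))

-- ===== PRECONDITION & SPEC =====
-- Pre_ excludes exactly the inputs where Python A raises: an empty batch_order
-- (ZeroDivisionError) and, when there is at least one batch (txt nonempty), an entry of
-- batch_order out of range for a length-n batch (IndexError). B raises identically there.
def Pre_send_batch (txt : String) (batch_order : List Int) (shift : Int) : Prop :=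
  batch_order ≠ [] ∧
    (txt ≠ "" → ∀ j ∈ batch_order, PySem.Raise.InRange batch_order.length j)
instance (txt : String) (batch_order : List Int) (shift : Int) : Decidable (Pre_send_batch txt batch_order shift) := by unfold Pre_send_batch; infer_instance

def pvWitness_send_batch : String × List Int × Int := ("abcXY z!", [1, 0, -1], 3)

def Spec_send_batch (txt : String) (batch_order : List Int) (shift : Int) (out : List String) : Prop := out = send_batch_alt txt batch_order shift
instance (txt : String) (batch_order : List Int) (shift : Int) (out : List String) : Decidable (Spec_send_batch txt batch_order shift out) := by unfold Spec_send_batch; infer_instance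

-- ===== CLAIM (what is proved, stated in full; the proofs are below) =====
def Claim_equal_send_batch : Prop := ∀ (txt : String) (batch_order : List Int) (shift : Int), Dom_send_batch txt batch_order shift → Pre_send_batch txt batch_order shift → Spec_send_batch txt batch_order shift (send_batch txt batch_order shift)

-- ===== LEMMAS AND PROOFS =====

-- the common shape both ports are reduced to: row k, entry j is the encrypted text's
-- character at position n*k + (j mod n), defaulting to '_' past the end
def pvSpec (txt : String) (order : List Int) (shift : Int) : List String :=
  let E := txt.toList.map (fun c => pvShiftCharB c shift)
  let n := order.length
  let nb := E.length / n + (if E.length % n = 0 then 0 else 1)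
  (List.range nb).map (fun k => String.ofList (order.map (fun j =>
    E.getD (n * k + (PySem.Int.mod j (n : Int)).toNat) '_')))

-- ===== A-side lemmas =====

theorem foldl_set_aux (u : Char → Char) (g : List Char → Nat → List Char)
    (hg : ∀ tl k, k < tl.length → g tl k = tl.set k (u (tl.getD k ' ')))
    (cs : List Char) (m : Nat) (hm : m ≤ cs.length) :
    (List.range m).foldl g cs = (cs.take m).map u ++ cs.drop m := by
  induction m with
  | zero => simp
  | succ m ih =>
    have hm' : m < cs.length := by omega
    rw [List.range_succ, List.foldl_append, ih (by omega)]
    rw [List.foldl_cons, List.foldl_nil]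
    rw [hg _ m (by simp; omega)]
    have hlen : ((cs.take m).map u).length = m := by simp; omega
    have hgetD : ((cs.take m).map u ++ cs.drop m).getD m ' ' = cs[m] := by
      rw [List.getD_append_right _ _ _ _ (by omega), hlen, Nat.sub_self]
      rw [List.drop_eq_getElem_cons hm']
      simp [List.getD, List.getElem?_eq_getElem hm']
    rw [hgetD]
    rw [List.set_append_right _ _ (by omega : ((cs.take m).map u).length ≤ m), hlen, Nat.sub_self]
    rw [List.drop_eq_getElem_cons hm']
    simp only [List.set_cons_zero]
    rw [List.take_add_one, List.map_append]
    simp [hm']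

theorem caesarA_eq_map (cs : List Char) (shift : Int) :
    pvCaesarA cs shift = cs.map (fun c => pvShiftCharB c shift) := by
  unfold pvCaesarA
  rw [PySem.List.pyRange_one, List.foldl_map]
  have h1 : ((cs.length : Int) - 0).toNat = cs.length := by omega
  rw [h1]
  refine foldl_set_aux (fun c => pvShiftCharB c shift) _ ?_ cs cs.length le_rfl |>.trans ?_
  · intro tl k hk
    simp only [zero_add, PySem.List.pyGetD_natCast, PySem.List.pySetD_natCast]
    rw [List.getD_eq_getElem _ _ hk]
    set c := tl[k]
    by_cases hl : PySem.Chars.islower c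
    · have ha : PySem.Chars.isalpha c = true := by simp [PySem.Chars.isalpha, hl]
      simp only [ha, if_pos, hl]
      simp only [PySem.Chars.islower, Bool.and_eq_true, decide_eq_true_eq] at hl
      simp [pvShiftCharB, hl]
    · by_cases hu : PySem.Chars.isupper c
      · have ha : PySem.Chars.isalpha c = true := by simp [PySem.Chars.isalpha, hu]
        simp only [ha, if_true, hl, if_false, Bool.false_eq_true]
        simp only [PySem.Chars.isupper, Bool.and_eq_true, decide_eq_true_eq] at hu
        simp only [PySem.Chars.islower, Bool.and_eq_true, decide_eq_true_eq, not_and] at hl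
        have hnl : ¬ ('a' ≤ c ∧ c ≤ 'z') := by
          intro h; exact absurd (hl h.1) (by simp [h.2])
        simp [pvShiftCharB, hnl, hu]
      · have ha : PySem.Chars.isalpha c = false := by
          simp [PySem.Chars.isalpha, hl, hu]
        simp only [ha, Bool.false_eq_true, if_false]
        simp only [PySem.Chars.islower, Bool.and_eq_true, decide_eq_true_eq, not_and] at hl
        simp only [PySem.Chars.isupper, Bool.and_eq_true, decide_eq_true_eq, not_and] at hu
        have hnl : ¬ ('a' ≤ c ∧ c ≤ 'z') := fun h => absurd (hl h.1) (by simp [h.2])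
        have hnu : ¬ ('A' ≤ c ∧ c ≤ 'Z') := fun h => absurd (hu h.1) (by simp [h.2])
        rw [pvShiftCharB]
        simp only [hnl, hnu, if_false]
        exact (List.set_getElem_self ..).symm
  · simp

theorem foldl_append_underscore (l : List Int) (e : List Char) :
    l.foldl (fun a _ => a ++ ['_']) e = e ++ List.replicate l.length '_' := by
  induction l generalizing e with
  | nil => simp
  | cons x xs ih => simp [ih, ← List.replicate_succ]

theorem pyRange_mul (n nb : Nat) (hn : 0 < n) :
    PySem.List.pyRange 0 ((n * nb : Nat) : Int) (n : Int) =
      (List.range nb).map (fun k => ((n * k : Nat) : Int)) := by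
  rw [PySem.List.pyRange_of_pos _ _ (by exact_mod_cast hn)]
  rcases Nat.eq_zero_or_pos nb with h0 | hpos
  · simp [h0]
  · have hlt : (0 : Int) < ((n * nb : Nat) : Int) := by
      exact_mod_cast Nat.mul_pos hn hpos
    rw [if_pos hlt]
    have hcount : ((((n * nb : Nat) : Int) - 0 + (n : Int) - 1) / (n : Int)).toNat = nb := by
      have h1 : (((n * nb : Nat) : Int) - 0 + (n : Int) - 1) = ((n * nb + (n - 1) : Nat) : Int) := by
        push_cast; omega
      rw [h1, ← Int.natCast_div, Int.toNat_natCast]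
      rw [Nat.mul_add_div hn, Nat.div_eq_of_lt (by omega)]
      omega
    rw [hcount]
    exact List.map_congr_left (fun k _ => by push_cast; ring)

-- get with default past a padding: for b < k, (xs ++ pad-to-k).getD b d' = xs.getD b d
theorem getD_append_pad {α : Type} (xs : List α) (k b : Nat) (d d' : α) (hb : b < k) :
    (xs ++ List.replicate (k - xs.length) d).getD b d' = xs.getD b d := by
  by_cases h : b < xs.length
  · rw [List.getD_append _ _ _ _ h, List.getD_eq_getElem _ _ h, List.getD_eq_getElem _ _ h]
  · rw [List.getD_append_right _ _ _ _ (by omega), List.getD_eq_getD_getElem?]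
    rw [List.getElem?_replicate]
    have : b - xs.length < k - xs.length := by omega
    simp [this, List.getD_eq_getD_getElem?, List.getElem?_eq_none (by omega : xs.length ≤ b)]

-- Python indexing of a length-n list at an in-range (possibly negative) index
theorem pyGetD_mod {α : Type} (xs : List α) (n : Nat) (hn : 0 < n) (hlen : xs.length = n)
    (j : Int) (h1 : -(n : Int) ≤ j) (h2 : j < (n : Int)) (d : α) :
    PySem.List.pyGetD xs j d = xs.getD (PySem.Int.mod j (n : Int)).toNat d := by
  have hmod : PySem.Int.mod j (n : Int) = j % (n : Int) :=
    PySem.Int.mod_eq_emod_of_pos (by exact_mod_cast hn)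
  by_cases h0 : 0 ≤ j
  · rw [PySem.List.pyGetD_of_nonneg _ _ h0, hmod, Int.emod_eq_of_lt h0 h2]
  · have hk : j = -(((-j).toNat : Nat) : Int) := by omega
    have hkpos : 0 < (-j).toNat := by omega
    have hkle : (-j).toNat ≤ xs.length := by omega
    rw [hk, PySem.List.pyGetD_neg_natCast _ _ _ hkpos hkle]
    have hmodval : PySem.Int.mod j (n : Int) = j + (n : Int) := by
      rw [hmod, Int.emod_eq_add_self_emod, Int.emod_eq_of_lt (by omega) (by omega)]
    rw [← hk, hmodval]
    have hidx : (j + (n : Int)).toNat = xs.length - (-j).toNat := by omega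
    rw [hidx, List.getD_eq_getElem _ _ (by omega)]

-- batch entry: indexing the k-th n-chunk of P is indexing P
theorem getD_take_drop {α : Type} (P : List α) (a n m : Nat) (d : α)
    (hm : m < n) (ha : a + n ≤ P.length) :
    ((P.drop a).take n).getD m d = P.getD (a + m) d := by
  have h1 : m < ((P.drop a).take n).length := by simp; omega
  rw [List.getD_eq_getElem _ _ h1, List.getD_eq_getElem _ _ (by omega)]
  rw [List.getElem_take, List.getElem_drop]

-- ===== B-side lemmas: the scatter loop builds exactly the columns =====

-- pvPick n E m e: the characters of E at positions p (absolute position m + index)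
-- with (m + index) % n = e, in order — the column e of the scatter loop
def pvPick (n : Nat) : List Char → Nat → Nat → List Char
  | [], _, _ => []
  | c :: cs, m, e => (if m % n = e then [c] else []) ++ pvPick n cs (m + 1) e

theorem pick_append (n : Nat) (xs ys : List Char) (m e : Nat) :
    pvPick n (xs ++ ys) m e = pvPick n xs m e ++ pvPick n ys (m + xs.length) e := by
  induction xs generalizing m with
  | nil => simp [pvPick]
  | cons c cs ih =>
    simp only [List.cons_append, pvPick, ih, List.append_assoc, List.length_cons]
    have : m + 1 + cs.length = m + (cs.length + 1) := by omega
    rw [this]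

theorem pick_shift (n : Nat) (ys : List Char) (m e : Nat) :
    pvPick n ys (m + n) e = pvPick n ys m e := by
  induction ys generalizing m with
  | nil => rfl
  | cons c cs ih =>
    simp only [pvPick, Nat.add_mod_right]
    have : m + n + 1 = (m + 1) + n := by omega
    rw [this, ih]

theorem pick_lt (n : Nat) (F : List Char) (m e : Nat) (h : m + F.length ≤ n) :
    pvPick n F m e = if m ≤ e ∧ e < m + F.length then [F.getD (e - m) ' '] else [] := by
  induction F generalizing m with
  | nil => simp [pvPick]
  | cons c cs ih =>
    simp only [List.length_cons] at h
    have hm : m % n = m := Nat.mod_eq_of_lt (by omega)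
    simp only [pvPick, hm, ih (m + 1) (by omega), List.length_cons]
    by_cases he : m = e
    · subst he
      rw [if_pos rfl, if_neg (by omega), if_pos (by omega)]
      simp
    · rw [if_neg he]
      by_cases hc : m + 1 ≤ e ∧ e < m + 1 + cs.length
      · rw [if_pos hc, if_pos (by omega)]
        have hsub : e - m = (e - (m + 1)) + 1 := by omega
        rw [hsub]
        simp
      · rw [if_neg hc, if_neg (by omega)]
        simp

theorem pick_block (n : Nat) (E : List Char) (e : Nat) (hn : 0 < n) (he : e < n) :
    pvPick n E 0 e =
      (if e < E.length then [E.getD e ' '] else []) ++ pvPick n (E.drop n) 0 e := by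
  conv_lhs => rw [← List.take_append_drop n E, pick_append]
  congr 1
  · rw [pick_lt n _ 0 e (by simp)]
    simp only [Nat.zero_add, Nat.le_zero, Nat.zero_le, true_and, Nat.sub_zero]
    by_cases h : e < E.length
    · rw [if_pos (by simp; omega), if_pos h]
      congr 1
      rw [List.getD_eq_getElem?_getD, List.getD_eq_getElem?_getD, List.getElem?_take_of_lt he]
    · rw [if_neg (by simp; omega), if_neg h]
  · by_cases h : n ≤ E.length
    · rw [List.length_take, Nat.min_eq_left h]
      have h0 : (0 : Nat) + n = n := by omega
      rw [← h0, pick_shift]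
    · rw [List.drop_eq_nil_of_le (by omega)]
      simp [pvPick]

theorem pick_nil_of_le (n : Nat) (E : List Char) (e : Nat) (hle : E.length ≤ e) (he : e < n) :
    pvPick n E 0 e = [] := by
  rw [pick_lt n E 0 e (by omega)]
  simp; omega

-- the b-th entry of column e (with '_' default) is E[e + b*n] (with '_' default)
theorem pick_getD (n : Nat) (e : Nat) (hn : 0 < n) (he : e < n) :
    ∀ (b : Nat) (E : List Char), (pvPick n E 0 e).getD b '_' = E.getD (e + b * n) '_' := by
  intro b
  induction b with
  | zero =>
    intro E
    rw [pick_block n E e hn he]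
    by_cases h : e < E.length
    · rw [if_pos h]
      have h0 : e + 0 * n = e := by omega
      rw [h0]
      simp only [List.singleton_append, List.getD_cons_zero]
      rw [List.getD_eq_getElem _ _ h, List.getD_eq_getElem _ _ h]
    · rw [if_neg h]
      simp only [List.nil_append]
      rw [pick_nil_of_le n (E.drop n) e (by simp; omega) he]
      rw [List.getD_eq_getElem?_getD, List.getD_eq_getElem?_getD,
        List.getElem?_eq_none (by omega : E.length ≤ e + 0 * n)]
      rfl
  | succ b ih =>
    intro E
    rw [pick_block n E e hn he]
    by_cases h : e < E.length
    · rw [if_pos h]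
      simp only [List.singleton_append, List.getD_cons_succ]
      rw [ih (E.drop n)]
      rw [List.getD_eq_getElem?_getD, List.getD_eq_getElem?_getD, List.getElem?_drop]
      congr 2
      ring
    · rw [if_neg h, List.nil_append]
      rw [pick_nil_of_le n (E.drop n) e (by simp; omega) he]
      rw [List.getD_eq_getElem?_getD, List.getD_eq_getElem?_getD,
        List.getElem?_eq_none (by simp : (([] : List Char)).length ≤ b + 1),
        List.getElem?_eq_none (le_trans (Nat.le_of_not_lt h) (Nat.le_add_right _ _))]

-- the scatter loop computes the columns pvPick
theorem fold_cols (n : Nat) (hn : 0 < n) (shift : Int) :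
    ∀ (E : List Char) (m : Nat) (cols : List (List Char)), cols.length = n →
    ((PySem.List.enumerate E (m : Int)).foldl
      (fun cols pc =>
        let e := PySem.Int.mod pc.1 (n : Int)
        PySem.List.pySetD cols e (PySem.List.pyGetD cols e [] ++ [pvShiftCharB pc.2 shift])) cols)
      = (List.range n).map (fun e => cols.getD e [] ++ pvPick n (E.map (fun c => pvShiftCharB c shift)) m e) := by
  intro E
  induction E with
  | nil =>
    intro m cols hlen
    rw [PySem.List.enumerate_nil]
    simp only [List.foldl_nil, List.map_nil, pvPick, List.append_nil]
    refine List.ext_getElem (by simp [hlen]) ?_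
    intro i h1 h2
    simp only [List.getElem_map, List.getElem_range]
    rw [List.getD_eq_getElem _ _ (by omega)]
  | cons c cs ih =>
    intro m cols hlen
    rw [PySem.List.enumerate_cons, List.foldl_cons]
    have hmc : ((m : Int) + 1) = ((m + 1 : Nat) : Int) := by push_cast; ring
    have hmod : PySem.Int.mod ((m : Nat) : Int) ((n : Nat) : Int) = ((m % n : Nat) : Int) :=
      PySem.Int.mod_natCast m n
    simp only [hmc, hmod, PySem.List.pySetD_natCast, PySem.List.pyGetD_natCast]
    rw [ih (m + 1) _ (by simp [hlen])]
    refine List.map_congr_left ?_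
    intro e hme
    have he : e < n := List.mem_range.mp hme
    have hmn : m % n < n := Nat.mod_lt _ hn
    have hset : (cols.set (m % n) (cols.getD (m % n) [] ++ [pvShiftCharB c shift])).getD e [] =
        if e = m % n then cols.getD (m % n) [] ++ [pvShiftCharB c shift] else cols.getD e [] := by
      rw [List.getD_eq_getElem?_getD, List.getElem?_set]
      by_cases hcase : m % n = e
      · subst hcase
        rw [if_pos rfl, if_pos (by omega), if_pos rfl]
        rfl
      · rw [if_neg hcase, if_neg (fun h => hcase h.symm)]
        rw [List.getD_eq_getElem?_getD]
    rw [hset]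
    simp only [List.map_cons, pvPick]
    by_cases hcase : e = m % n
    · subst hcase
      rw [if_pos rfl, if_pos rfl, List.append_assoc]
    · rw [if_neg hcase, if_neg (fun h => hcase h.symm)]
      simp

-- ceiling division: -((-L) // n) = L/n + (1 if L%n else 0)
theorem ceil_div_eq (L n : Nat) (hn : 0 < n) :
    -(PySem.Int.floordiv (-(L : Int)) (n : Int)) =
      ((L / n + (if L % n = 0 then 0 else 1) : Nat) : Int) := by
  rw [PySem.Int.neg_floordiv_neg_eq_iff_of_pos (by exact_mod_cast hn)]
  have hd := Nat.div_add_mod L n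
  have hr : L % n < n := Nat.mod_lt _ hn
  by_cases h0 : L % n = 0
  · simp only [h0, if_pos rfl]
    constructor
    · push_cast; nlinarith [Nat.div_add_mod L n]
    · push_cast; nlinarith [Nat.div_add_mod L n]
  · simp only [if_neg h0]
    constructor
    · push_cast; nlinarith [Nat.div_add_mod L n, Nat.pos_of_ne_zero h0]
    · push_cast; nlinarith [Nat.div_add_mod L n]


-- ===== the two reduction theorems =====

theorem A_batches_eq (E : List Char) (order : List Int) (hn : 0 < order.length)
    (hin : E ≠ [] → ∀ j ∈ order, PySem.Raise.InRange order.length j) :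
    (((PySem.List.pyRange 0
        (((if E.length % order.length ≠ 0 then
            (PySem.List.pyRange 0 ((order.length : Int) - ((E.length % order.length : Nat) : Int)) 1).foldl
              (fun a _ => a ++ ['_']) E
          else E).length : Nat) : Int) (order.length : Int)).map
        (fun i => PySem.List.slice
          (if E.length % order.length ≠ 0 then
            (PySem.List.pyRange 0 ((order.length : Int) - ((E.length % order.length : Nat) : Int)) 1).foldl
              (fun a _ => a ++ ['_']) E
          else E) (some i) (some (i + (order.length : Int))))).map
      (fun text => String.ofList (pvShuffleA text order)))
    = (List.range (E.length / order.length + (if E.length % order.length = 0 then 0 else 1))).map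
        (fun k => String.ofList (order.map (fun j =>
          E.getD (order.length * k + (PySem.Int.mod j (order.length : Int)).toNat) '_'))) := by
  set n := order.length with hnn
  set L := E.length with hL
  set q := L / n with hqdef
  set r := L % n with hrdef
  have hq : L = n * q + r := (Nat.div_add_mod L n).symm
  have hr : r < n := Nat.mod_lt _ hn
  set pad := if r = 0 then 0 else n - r with hpaddef
  set nb := if r = 0 then q else q + 1 with hnbdef
  have hM : L + pad = n * nb := by
    by_cases h0 : r = 0
    · simp [hpaddef, hnbdef, h0]
      omega
    · simp [hpaddef, hnbdef, h0, Nat.mul_succ]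
      omega
  have hnb' : q + (if r = 0 then 0 else 1) = nb := by
    by_cases h0 : r = 0 <;> simp [hnbdef, h0]
  have hpad : (if L % n ≠ 0 then
      (PySem.List.pyRange 0 ((n : Int) - ((L % n : Nat) : Int)) 1).foldl (fun a _ => a ++ ['_']) E
    else E) = E ++ List.replicate pad '_' := by
    rw [← hrdef]
    by_cases h0 : r = 0
    · simp [h0, hpaddef]
    · rw [if_pos h0, foldl_append_underscore, PySem.List.length_pyRange_one]
      have : (((n : Int) - (r : Int)) - 0).toNat = pad := by
        simp only [hpaddef, if_neg h0]
        omega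
      rw [this]
  rw [hpad, hnb']
  have hlen : ((E ++ List.replicate pad '_').length : Nat) = n * nb := by
    simp [List.length_append, List.length_replicate, ← hL]; omega
  rw [hlen, pyRange_mul n nb hn]
  simp only [List.map_map]
  refine List.map_congr_left (fun k hk => ?_)
  rw [List.mem_range] at hk
  simp only [Function.comp]
  rw [PySem.List.slice_natCast_add]
  congr 1
  unfold pvShuffleA
  refine List.map_congr_left (fun j hj => ?_)
  have hEne : E ≠ [] := by
    intro h0
    have : L = 0 := by rw [hL, h0]; rfl
    have hr0 : r = 0 := by omega
    have hq0 : q = 0 := by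
      rw [hqdef, this]; exact Nat.zero_div n
    rw [hnbdef, if_pos hr0, hq0] at hk
    omega
  have hjr := hin hEne j hj
  have hb1 : -((n : Int)) ≤ j := by
    have := hjr; simp [PySem.Raise.InRange, hnn] at this; omega
  have hb2 : j < (n : Int) := by
    have := hjr; simp [PySem.Raise.InRange, hnn] at this; omega
  have hkn : n * k + n ≤ n * nb := by
    have h1 : n * (k + 1) ≤ n * nb := Nat.mul_le_mul_left n hk
    rw [Nat.mul_succ] at h1
    exact h1
  set P := E ++ List.replicate pad '_' with hP
  have hPlen : P.length = n * nb := hlen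
  have hbatchlen : ((P.drop (n * k)).take n).length = n := by
    rw [List.length_take, List.length_drop, hPlen]
    omega
  rw [pyGetD_mod ((P.drop (n * k)).take n) n hn hbatchlen j hb1 hb2 ' ']
  set jm := (PySem.Int.mod j (n : Int)).toNat with hjmdef
  have hjm : jm < n := by
    have hmod : PySem.Int.mod j (n : Int) = j % (n : Int) :=
      PySem.Int.mod_eq_emod_of_pos (by exact_mod_cast hn)
    have h1 : 0 ≤ j % (n : Int) := Int.emod_nonneg j (by exact_mod_cast hn.ne')
    have h2 : j % (n : Int) < (n : Int) := Int.emod_lt_of_pos j (by exact_mod_cast hn)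
    rw [hjmdef, hmod]
    omega
  rw [getD_take_drop P (n * k) n jm ' ' hjm (by omega)]
  have hpadval : pad = n * nb - E.length := by omega
  rw [hP, hpadval]
  exact getD_append_pad E (n * nb) (n * k + jm) '_' ' ' (by omega)

theorem B_cols_eq (E0 : List Char) (order : List Int) (shift : Int) (hn : 0 < order.length)
    (hin : E0 ≠ [] → ∀ j ∈ order, PySem.Raise.InRange order.length j) :
    ((PySem.List.pyRange 0 (-(PySem.Int.floordiv (-(E0.length : Int)) (order.length : Int))) 1).map
      (fun b => String.ofList (order.map (fun j =>
        PySem.List.pyGetD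
          (PySem.List.pyGetD
            (((PySem.List.enumerate E0).foldl
                (fun cols pc =>
                  let e := PySem.Int.mod pc.1 (order.length : Int)
                  PySem.List.pySetD cols e (PySem.List.pyGetD cols e [] ++ [pvShiftCharB pc.2 shift]))
                ((PySem.List.pyRange 0 (order.length : Int) 1).map (fun _ => ([] : List Char)))).map
              (fun col => col ++ List.replicate
                ((-(PySem.Int.floordiv (-(E0.length : Int)) (order.length : Int)) - (col.length : Int)).toNat) '_'))
            j [])
          b ' '))))
    = (List.range ((E0.map (fun c => pvShiftCharB c shift)).length / order.length +
          (if (E0.map (fun c => pvShiftCharB c shift)).length % order.length = 0 then 0 else 1))).map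
        (fun k => String.ofList (order.map (fun j =>
          (E0.map (fun c => pvShiftCharB c shift)).getD
            (order.length * k + (PySem.Int.mod j (order.length : Int)).toNat) '_'))) := by
  set n := order.length with hnn
  set E := E0.map (fun c => pvShiftCharB c shift) with hE
  have hEL : E.length = E0.length := by rw [hE, List.length_map]
  set nb := E.length / n + (if E.length % n = 0 then 0 else 1) with hnbdef
  have hceil : -(PySem.Int.floordiv (-(E0.length : Int)) (n : Int)) = ((nb : Nat) : Int) := by
    rw [hnbdef, hEL]
    exact ceil_div_eq E0.length n hn
  rw [hceil]
  have hfold := fold_cols n hn shift E0 0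
    ((PySem.List.pyRange 0 (n : Int) 1).map (fun _ => ([] : List Char)))
    (by rw [List.length_map, PySem.List.length_pyRange_one]; omega)
  simp only [Nat.cast_zero] at hfold
  rw [hfold]
  have hinit : ∀ e : Nat, (((PySem.List.pyRange 0 (n : Int) 1).map
      (fun _ => ([] : List Char)))).getD e [] = [] := by
    intro e
    rcases h : ((PySem.List.pyRange 0 (n : Int) 1).map (fun _ => ([] : List Char)))[e]? with _ | v
    · rw [List.getD_eq_getElem?_getD, h]; rfl
    · have := List.mem_of_getElem? h
      rcases List.mem_map.mp this with ⟨_, _, hv⟩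
      rw [List.getD_eq_getElem?_getD, h, ← hv]; rfl
  simp only [hinit, List.nil_append]
  rw [List.map_map, PySem.List.pyRange_one]
  have hcnt : ((((nb : Nat) : Int)) - 0).toNat = nb := by simp
  rw [hcnt, List.map_map]
  simp only [Function.comp_def]
  refine List.map_congr_left (fun k hk => ?_)
  rw [List.mem_range] at hk
  congr 1
  refine List.map_congr_left (fun j hj => ?_)
  have hE0ne : E0 ≠ [] := by
    intro h0
    rw [hnbdef, hE, h0] at hk
    simp at hk
  have hjr := hin hE0ne j hj
  have hb1 : -((n : Int)) ≤ j := by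
    have := hjr; simp [PySem.Raise.InRange, hnn] at this; omega
  have hb2 : j < (n : Int) := by
    have := hjr; simp [PySem.Raise.InRange, hnn] at this; omega
  have hcolslen : (((List.range n).map (fun e =>
      pvPick n (E0.map (fun c => pvShiftCharB c shift)) 0 e ++
        List.replicate ((((nb : Nat) : Int) -
          ((pvPick n (E0.map (fun c => pvShiftCharB c shift)) 0 e).length : Int)).toNat) '_')).length) = n := by
    rw [List.length_map, List.length_range]
  rw [pyGetD_mod _ n hn hcolslen j hb1 hb2 []]
  set jm := (PySem.Int.mod j (n : Int)).toNat with hjmdef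
  have hjm : jm < n := by
    have hmod : PySem.Int.mod j (n : Int) = j % (n : Int) :=
      PySem.Int.mod_eq_emod_of_pos (by exact_mod_cast hn)
    have h1 : 0 ≤ j % (n : Int) := Int.emod_nonneg j (by exact_mod_cast hn.ne')
    have h2 : j % (n : Int) < (n : Int) := Int.emod_lt_of_pos j (by exact_mod_cast hn)
    rw [hjmdef, hmod]
    omega
  rw [List.getD_eq_getElem _ _ (by rw [hcolslen]; exact hjm)]
  rw [List.getElem_map, List.getElem_range]
  rw [zero_add, PySem.List.pyGetD_natCast]
  have hc : ((((nb : Nat) : Int)) -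
      ((pvPick n (E0.map (fun c => pvShiftCharB c shift)) 0 jm).length : Int)).toNat =
      nb - (pvPick n (E0.map (fun c => pvShiftCharB c shift)) 0 jm).length := by omega
  rw [hc]
  rw [getD_append_pad _ nb k '_' ' ' hk]
  rw [pick_getD n jm hn hjm k (E0.map (fun c => pvShiftCharB c shift))]
  rw [← hE]
  congr 1
  ring

theorem A_to_spec (txt : String) (order : List Int) (shift : Int)
    (hne : order ≠ [])
    (hin : txt ≠ "" → ∀ j ∈ order, PySem.Raise.InRange order.length j) :
    send_batch txt order shift = pvSpec txt order shift := by
  have hn : order.length ≠ 0 := by simpa using hne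
  have hnp : 0 < order.length := Nat.pos_of_ne_zero hn
  have hin' : txt.toList.map (fun c => pvShiftCharB c shift) ≠ [] →
      ∀ j ∈ order, PySem.Raise.InRange order.length j := by
    intro hEne
    refine hin ?_
    intro h0
    apply hEne
    rw [h0]
    rfl
  unfold send_batch pvSpec
  simp only [if_neg hn]
  rw [caesarA_eq_map]
  exact A_batches_eq (txt.toList.map (fun c => pvShiftCharB c shift)) order hnp hin'

theorem B_to_spec (txt : String) (order : List Int) (shift : Int)
    (hne : order ≠ [])
    (hin : txt ≠ "" → ∀ j ∈ order, PySem.Raise.InRange order.length j) :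
    send_batch_alt txt order shift = pvSpec txt order shift := by
  have hn : order.length ≠ 0 := by simpa using hne
  have hnp : 0 < order.length := Nat.pos_of_ne_zero hn
  have hin' : txt.toList ≠ [] → ∀ j ∈ order, PySem.Raise.InRange order.length j := by
    intro hEne
    refine hin ?_
    intro h0
    apply hEne
    rw [h0]
    rfl
  unfold send_batch_alt pvSpec
  simp only [if_neg hn]
  exact B_cols_eq txt.toList order shift hnp hin'

-- ===== VERDICT (by name: the statement is the Claim_ definition above) =====
theorem send_batch_spec : Claim_equal_send_batch := by
  intro txt batch_order shift _ hPre
  unfold Spec_send_batch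
  rw [A_to_spec txt batch_order shift hPre.1 hPre.2,
      B_to_spec txt batch_order shift hPre.1 hPre.2]
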